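-- pv_equiv track=rewrite | github.com/saajiidi/Order-Process-Automation | src/modules/ecommerce.py | _has_fuzzy_column
-- ===== SOURCE A (Python) =====
-- def _has_fuzzy_column(columns: list[str], aliases: list[str]) -> bool:
--     cols_lower = [str(col).strip().lower() for col in columns]
--     for alias in aliases:
--         if alias.lower() in cols_lower:
--             return True
--     for alias in aliases:
--         if any(alias.lower() in col for col in cols_lower):
--             return True
--     return False
-- ===== SOURCE B (Python) =====
-- def _has_fuzzy_column(columns: list[str], aliases: list[str]) -> bool:
--     # Single pass over columns: normalize each column once, test all
--     # pre-lowered aliases as substrings (an exact match is a substring match,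
--     # so A's separate exact-membership phase is redundant).
--     needles = [alias.lower() for alias in aliases]
--     for col in columns:
--         col_norm = str(col).strip().lower()
--         if any(needle in col_norm for needle in needles):
--             return True
--     return False
-- ===== Notes on version B (the rewrite author's own statement) =====
-- stated objective: simpler
-- what changed: Drops A's redundant exact-membership phase (exact match is a substring match), pre-lowers the aliases once, and does a single columns-outer pass that normalizes each column on the fly instead of building cols_lower and scanning it twice with aliases outer.
import Mathlib
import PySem

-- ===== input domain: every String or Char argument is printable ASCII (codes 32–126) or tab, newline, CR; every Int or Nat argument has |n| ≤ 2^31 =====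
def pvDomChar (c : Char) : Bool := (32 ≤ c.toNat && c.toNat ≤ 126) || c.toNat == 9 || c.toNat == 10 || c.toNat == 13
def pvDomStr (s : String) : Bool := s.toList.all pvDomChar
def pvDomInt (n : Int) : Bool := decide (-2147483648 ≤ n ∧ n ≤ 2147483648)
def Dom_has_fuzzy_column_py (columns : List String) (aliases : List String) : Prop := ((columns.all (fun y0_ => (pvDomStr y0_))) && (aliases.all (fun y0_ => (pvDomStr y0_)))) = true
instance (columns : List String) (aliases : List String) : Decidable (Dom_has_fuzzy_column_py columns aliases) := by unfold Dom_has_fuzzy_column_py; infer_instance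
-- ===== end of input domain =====

-- B simplifies A: the exact-membership phase is redundant (an exact match is a
-- substring match), so B pre-lowers the aliases and makes one columns-outer pass.

-- ===== PORT A =====
-- cols_lower = [str(col).strip().lower() for col in columns]; two sequential
-- early-return loops over aliases (exact membership, then substring scan).
def has_fuzzy_column_py (columns : List String) (aliases : List String) : Bool :=
  let cols_lower := columns.map (fun col => PySem.Str.lower (PySem.Str.strip col))
  if aliases.any (fun al => cols_lower.contains (PySem.Str.lower al)) then
    true
  else if aliases.any (fun al => cols_lower.any (fun col => PySem.Str.isIn (PySem.Str.lower al) col)) then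
    true
  else
    false

-- ===== PORT B =====
def has_fuzzy_column_py_alt (columns : List String) (aliases : List String) : Bool :=
  let needles := aliases.map (fun al => PySem.Str.lower al)
  columns.any (fun col =>
    let col_norm := PySem.Str.lower (PySem.Str.strip col)
    needles.any (fun needle => PySem.Str.isIn needle col_norm))

-- ===== PRECONDITION & SPEC =====
def Spec_has_fuzzy_column_py (columns : List String) (aliases : List String) (out : Bool) : Prop := out = has_fuzzy_column_py_alt columns aliases
instance (columns : List String) (aliases : List String) (out : Bool) : Decidable (Spec_has_fuzzy_column_py columns aliases out) := by unfold Spec_has_fuzzy_column_py; infer_instance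

-- ===== CLAIM (what is proved, stated in full; the proofs are below) =====
def Claim_equal_has_fuzzy_column_py : Prop := ∀ (columns : List String) (aliases : List String), Dom_has_fuzzy_column_py columns aliases → Spec_has_fuzzy_column_py columns aliases (has_fuzzy_column_py columns aliases)

-- ===== LEMMAS AND PROOFS =====

-- an exact match is a substring match
lemma isIn_self (s : String) : PySem.Str.isIn s s = true := by
  rw [PySem.Str.isIn_iff_infix]

-- swap the nesting order of two Bool `any` scans
lemma any_swap {α β : Type} (l : List α) (m : List β) (p : α → β → Bool) :
    l.any (fun a => m.any (fun b => p a b)) = m.any (fun b => l.any (fun a => p a b)) := by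
  rw [Bool.eq_iff_iff]
  simp only [List.any_eq_true]
  tauto

-- A's first (exact-membership) phase is subsumed by its second (substring) phase
lemma exact_subsumed (columns aliases : List String) :
    (aliases.any fun al =>
        (columns.map (fun col => PySem.Str.lower (PySem.Str.strip col))).contains
          (PySem.Str.lower al)) = true →
    (aliases.any fun al =>
        (columns.map (fun col => PySem.Str.lower (PySem.Str.strip col))).any
          (fun col => PySem.Str.isIn (PySem.Str.lower al) col)) = true := by
  simp only [List.any_eq_true, List.contains_iff_mem]
  rintro ⟨al, hal, hmem⟩
  refine ⟨al, hal, PySem.Str.lower al, hmem, isIn_self _⟩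

-- A's substring phase computes exactly B (aliases-outer ↔ columns-outer)
lemma substring_phase_eq_alt (columns aliases : List String) :
    (aliases.any fun al =>
        (columns.map (fun col => PySem.Str.lower (PySem.Str.strip col))).any
          (fun col => PySem.Str.isIn (PySem.Str.lower al) col)) =
      has_fuzzy_column_py_alt columns aliases := by
  simp only [has_fuzzy_column_py_alt, List.any_map]
  exact any_swap aliases columns _

-- ===== VERDICT (by name: the statement is the Claim_ definition above) =====
theorem has_fuzzy_column_py_spec : Claim_equal_has_fuzzy_column_py := by
  intro columns aliases _
  unfold Spec_has_fuzzy_column_py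
  simp only [has_fuzzy_column_py]
  split_ifs with h1 h2
  · exact (substring_phase_eq_alt columns aliases ▸ exact_subsumed columns aliases h1).symm
  · exact (substring_phase_eq_alt columns aliases ▸ h2).symm
  · rw [← substring_phase_eq_alt columns aliases]
    exact (Bool.not_eq_true _).mp h2 |>.symm
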